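/- GENERATED by mk_final_copies.py from the proof of the farm's unit `stb_vorbis_get_error` (farm:stb_vorbis_get_error.1: Proof.lean) as the
   re-elaboration sweep compiled it — do not edit. -/
import Asan.CheckWalk
import Vorbis.Spec.Units.stb_vorbis_get_error

open X86 X86.User Asan Vorbis

set_option maxRecDepth 4000
set_option maxHeartbeats 4000000

/-- `stb_vorbis_get_error(f)` satisfies its contract: `push rbx`, one check call, a 4-byte load and a 4-byte store through `f`,
`pop rbx ; ret`; straight-line code. -/
theorem Vorbis.Spec.Worked.stb_vorbis_get_error_ok : Vorbis.Spec.stb_vorbis_get_error.Statement := by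
  intro Lay hLay μ hμ u₀ hcode hload4 others frames u ret he hpre
  v_entry he
  obtain ⟨hsh, hobj⟩ := hpre
  -- where `*f` is: one arithmetic fact (inside the data space, off the text, off this function's stack)
  have hsp := hsh.rsp
  have hwhere := hobj.where_ hsh.inv hsh.offText (by u_omega)
  -- 0x10c600 (stb_vorbis_fixed.c:4354 – 4358): the whole function in one walk
  u_walk hcode [hμ.vendor] span [Vorbis.L.textLo, Vorbis.L.textHi] side (v_side)
  · -- 0x10c60b, the check of `int e = f->error;` (c:4355): `[f + 140, f + 144)` lies inside `*f`; the two stack stores so far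
    -- did not touch the shadow
    have hun : ShadowUntouched u.mem s_10c60b.mem := by v_untouched
    exact hobj.accSmall hsh.inv hun _ 4 (by decide) (by u_omega) (by u_omega)
  · -- 0x10c621, the state after the `ret`: the contract's `Returned`
    refine ReachVia.done ?_
    v_returned
    refine ⟨?_, ?_, ?_⟩
    · -- eax = old `f->error`: the 32-bit load zero-extended into rax
      rw [w_rax, Vorbis.toNat_ofBV32, Vorbis.Spec.toNat_ofNat32]
      exact Mem.readLE_lt' _ _ 4
    · -- `f->error = VORBIS__no_error;` (c:4356): the value stored is read back
      rw [w_mem, Mem.readLE_writeLE_same _ _ _ _ (by decide)]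
    · -- no store went to the shadow
      v_untouched
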